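-- pv_equiv track=rewrite | github.com/solurin/pythonstuff | MainWindow.py | untabify_line_unexposed
-- ===== SOURCE A (Python) =====
-- def untabify_line_unexposed(line, numpertab):
-- 	''' Only untabify the front of the line, not its interior '''
-- 	s = ""
-- 	i = 0
-- 	for ch in line:
-- 		if ch != " " and ch != "\t":
-- 			break
-- 		if ch == "\t":
-- 			s += " "*numpertab
-- 		i += 1
-- 	return s + line[i:]
-- ===== SOURCE B (Python) =====
-- def untabify_line_unexposed(line, numpertab):
--     ''' Only untabify the front of the line, not its interior '''
--     rest = line.lstrip(" \t")
--     i = len(line) - len(rest)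
--     return " " * (numpertab * line.count("\t", 0, i)) + rest
-- ===== Notes on version B (the rewrite author's own statement) =====
-- stated objective: simpler
-- what changed: Replaced A's character-by-character append-and-break loop (which grows the prefix string incrementally) by a find-prefix/count-tabs/multiply decomposition: lstrip locates the end of the leading whitespace, count counts its tabs, and one multiplication builds the replacement.
import Mathlib
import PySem

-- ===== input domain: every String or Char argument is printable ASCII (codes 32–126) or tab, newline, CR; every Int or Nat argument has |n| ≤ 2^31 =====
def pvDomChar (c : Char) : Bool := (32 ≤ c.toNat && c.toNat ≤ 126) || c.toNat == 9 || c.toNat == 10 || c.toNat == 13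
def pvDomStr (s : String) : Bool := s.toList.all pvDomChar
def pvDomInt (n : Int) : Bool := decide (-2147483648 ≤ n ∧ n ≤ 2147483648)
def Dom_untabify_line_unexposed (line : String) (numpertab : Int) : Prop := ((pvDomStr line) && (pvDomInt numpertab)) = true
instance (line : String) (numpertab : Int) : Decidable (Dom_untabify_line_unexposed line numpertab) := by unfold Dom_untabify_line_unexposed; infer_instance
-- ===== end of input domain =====

-- B replaces A's per-character append-and-break loop by a find-prefix / count-tabs /
-- multiply decomposition (objective: simpler).


-- ===== PORT A =====
-- A's for-loop with break: structural recursion over the characters, carrying the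
-- accumulated string s (as List Char) and the index i.  '" " * numpertab' with a
-- possibly negative int is the empty string, exactly List.replicate numpertab.toNat.
def untabifyALoop (numpertab : Int) (cs : List Char) (s : List Char) (i : Nat) :
    List Char × Nat :=
  match cs with
  | [] => (s, i)
  | c :: rest =>
    if c ≠ ' ' ∧ c ≠ '\t' then (s, i)
    else
      untabifyALoop numpertab rest
        (if c = '\t' then s ++ List.replicate numpertab.toNat ' ' else s) (i + 1)

def untabify_line_unexposed (line : String) (numpertab : Int) : String :=
  let r := untabifyALoop numpertab line.toList [] 0
  -- line[i:] with 0 ≤ i: exactly List.drop (Python slice clamps at the length, as drop does)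
  String.ofList (r.1 ++ line.toList.drop r.2)

-- ===== PORT B =====
-- Source B: rest = line.lstrip(" \t") — dropping exactly the chars of the set " \t" from the
-- front is List.dropWhile membership (exact); i = len(line) - len(rest), so the removed
-- prefix is takeWhile; line.count("\t", 0, i) counts '\t' in that prefix.
def untabify_line_unexposed_alt (line : String) (numpertab : Int) : String :=
  let rest := line.toList.dropWhile (fun c => c = ' ' ∨ c = '\t')
  let i := line.toList.length - rest.length
  String.ofList (List.replicate (numpertab * ((line.toList.take i).count '\t')).toNat ' ' ++ rest)

-- ===== PRECONDITION & SPEC =====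
def Spec_untabify_line_unexposed (line : String) (numpertab : Int) (out : String) : Prop := out = untabify_line_unexposed_alt line numpertab
instance (line : String) (numpertab : Int) (out : String) : Decidable (Spec_untabify_line_unexposed line numpertab out) := by unfold Spec_untabify_line_unexposed; infer_instance

-- ===== CLAIM (what is proved, stated in full; the proofs are below) =====
def Claim_equal_untabify_line_unexposed : Prop := ∀ (line : String) (numpertab : Int), Dom_untabify_line_unexposed line numpertab → Spec_untabify_line_unexposed line numpertab (untabify_line_unexposed line numpertab)

-- ===== LEMMAS AND PROOFS =====

lemma untabifyALoop_eq (numpertab : Int) (cs : List Char) (s : List Char) (i : Nat) :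
    untabifyALoop numpertab cs s i =
      (s ++ List.replicate
          (numpertab.toNat * ((cs.takeWhile (fun c => c = ' ' ∨ c = '\t')).count '\t')) ' ',
       i + (cs.takeWhile (fun c => c = ' ' ∨ c = '\t')).length) := by
  induction cs generalizing s i with
  | nil => simp [untabifyALoop]
  | cons c rest ih =>
    by_cases hw : c = ' ' ∨ c = '\t'
    · have hnb : ¬ (c ≠ ' ' ∧ c ≠ '\t') := by tauto
      rw [untabifyALoop]
      simp only [hnb, if_false, ih]
      rcases hw with h | h
      · subst h
        simp [Nat.add_assoc, Nat.add_comm 1]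
      · subst h
        simp only [List.takeWhile_cons, decide_true, or_true, List.count_cons,
          List.length_cons, if_true, Prod.mk.injEq]
        refine ⟨?_, by omega⟩
        rw [List.append_assoc, ← List.replicate_add]
        congr 1
        simp
        ring
    · have hb : (c ≠ ' ' ∧ c ≠ '\t') := by tauto
      rw [untabifyALoop]
      simp [hb]

lemma toNat_mul_natCast (a : Int) (n : Nat) : (a * (n : Int)).toNat = a.toNat * n := by
  rcases Int.le_total 0 a with h | h
  · obtain ⟨m, rfl⟩ := Int.eq_ofNat_of_zero_le h
    exact_mod_cast rfl
  · have h1 : a * (n : Int) ≤ 0 :=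
      mul_nonpos_of_nonpos_of_nonneg h (by positivity)
    have h2 : a.toNat = 0 := Int.toNat_of_nonpos h
    simp [Int.toNat_of_nonpos h1, h2]

lemma drop_len_takeWhile (p : Char → Bool) (l : List Char) :
    l.drop ((l.takeWhile p).length) = l.dropWhile p := by
  induction l with
  | nil => simp
  | cons c rest ih =>
    by_cases h : p c <;> simp [h, ih]

lemma take_len_takeWhile (p : Char → Bool) (l : List Char) :
    l.take ((l.takeWhile p).length) = l.takeWhile p := by
  induction l with
  | nil => simp
  | cons c rest ih =>
    by_cases h : p c <;> simp [h, ih]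

-- ===== VERDICT (by name: the statement is the Claim_ definition above) =====
theorem untabify_line_unexposed_spec : Claim_equal_untabify_line_unexposed := by
  intro line numpertab _
  unfold Spec_untabify_line_unexposed untabify_line_unexposed untabify_line_unexposed_alt
  simp only [untabifyALoop_eq, Nat.zero_add, List.nil_append]
  have hlen : line.toList.length =
      (line.toList.takeWhile (fun c => c = ' ' ∨ c = '\t')).length +
      (line.toList.dropWhile (fun c => c = ' ' ∨ c = '\t')).length := by
    conv_lhs => rw [← List.takeWhile_append_dropWhile
      (p := fun c => decide (c = ' ' ∨ c = '\t')) (l := line.toList)]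
    exact List.length_append
  have hi : line.toList.length -
      (line.toList.dropWhile (fun c => c = ' ' ∨ c = '\t')).length =
      (line.toList.takeWhile (fun c => c = ' ' ∨ c = '\t')).length := by omega
  rw [hi, take_len_takeWhile, drop_len_takeWhile, toNat_mul_natCast]
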